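-- pv_equiv track=rewrite | github.com/rogue0xbyte/hawk | src/hawk/utils/samplers.py | centred_binomial_from_bits
-- ===== SOURCE A (Python) =====
-- from typing import List
--
-- def centred_binomial_from_bits(
--     bits: List[int], n: int, eta: int
-- ) -> List[int]:
--     if eta <= 0:
--         raise ValueError("eta must be > 0")
--     need = 2 * eta * n
--     if len(bits) < need:
--         raise ValueError(f"not enough bits: need {need}, got {len(bits)}")
--     out = []
--     pos = 0
--     for i in range(n):
--         a = 0
--         b = 0
--         for j in range(eta):
--             a += bits[pos + j]
--         for j in range(eta):
--             b += bits[pos + eta + j]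
--         out.append(a - b)
--         pos += 2 * eta
--     return out
-- ===== SOURCE B (Python) =====
-- from typing import List
--
-- def centred_binomial_from_bits(
--     bits: List[int], n: int, eta: int
-- ) -> List[int]:
--     if eta <= 0:
--         raise ValueError("eta must be > 0")
--     need = 2 * eta * n
--     if len(bits) < need:
--         raise ValueError(f"not enough bits: need {need}, got {len(bits)}")
--     P = [0]
--     for k in range(need):
--         P.append(P[-1] + bits[k])
--     return [
--         2 * P[2 * eta * i + eta] - P[2 * eta * i] - P[2 * eta * i + 2 * eta]
--         for i in range(n)
--     ]
-- ===== Notes on version B (the rewrite author's own statement) =====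
-- stated objective: alternative
-- what changed: Replaces A's per-sample nested accumulation loops by a prefix-sum table over the needed bits, computing each sample from three table lookups.
import Mathlib
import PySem

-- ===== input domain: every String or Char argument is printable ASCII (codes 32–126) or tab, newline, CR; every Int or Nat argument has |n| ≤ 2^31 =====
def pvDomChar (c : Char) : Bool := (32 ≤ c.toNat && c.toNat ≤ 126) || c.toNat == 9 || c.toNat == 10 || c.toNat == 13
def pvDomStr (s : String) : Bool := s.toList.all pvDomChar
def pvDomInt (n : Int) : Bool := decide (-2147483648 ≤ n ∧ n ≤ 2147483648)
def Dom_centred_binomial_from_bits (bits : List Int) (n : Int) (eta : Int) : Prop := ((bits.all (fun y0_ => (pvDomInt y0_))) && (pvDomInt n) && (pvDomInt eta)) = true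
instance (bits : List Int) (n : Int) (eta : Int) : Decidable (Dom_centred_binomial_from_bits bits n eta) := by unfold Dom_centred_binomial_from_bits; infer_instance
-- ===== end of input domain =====

-- B replaces A's per-sample nested accumulation loops by a prefix-sum table over the
-- needed bits; each sample is computed from three table lookups (alternative decomposition).

-- ===== PORT A =====
def centred_binomial_from_bits (bits : List Int) (n : Int) (eta : Int) : List Int :=
  if eta ≤ 0 then []  -- Python: raise ValueError("eta must be > 0"); excluded by Pre_
  else
    let need := 2 * eta * n
    if (bits.length : Int) < need then []  -- Python: raise ValueError(...); excluded by Pre_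
    else
      -- for i in range(n): a = Σ bits[pos+j]; b = Σ bits[pos+eta+j]; out.append(a-b); pos += 2*eta
      let st := (PySem.List.pyRange 0 n 1).foldl
        (fun (st : List Int × Int) _ =>
          let a := (PySem.List.pyRange 0 eta 1).foldl
            (fun a j => a + PySem.List.pyGetD bits (st.2 + j) 0) 0
          let b := (PySem.List.pyRange 0 eta 1).foldl
            (fun b j => b + PySem.List.pyGetD bits (st.2 + eta + j) 0) 0
          (st.1 ++ [a - b], st.2 + 2 * eta))
        ([], 0)
      st.1

-- ===== PORT B =====
def centred_binomial_from_bits_alt (bits : List Int) (n : Int) (eta : Int) : List Int :=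
  if eta ≤ 0 then []  -- Python: raise ValueError("eta must be > 0"); excluded by Pre_
  else
    let need := 2 * eta * n
    if (bits.length : Int) < need then []  -- Python: raise ValueError(...); excluded by Pre_
    else
      -- P = [0]; for k in range(need): P.append(P[-1] + bits[k])
      let P := (PySem.List.pyRange 0 need 1).foldl
        (fun P k => P ++ [PySem.List.pyGetD P (-1) 0 + PySem.List.pyGetD bits k 0]) [0]
      -- [2*P[2*eta*i+eta] - P[2*eta*i] - P[2*eta*i+2*eta] for i in range(n)]
      (PySem.List.pyRange 0 n 1).map
        (fun i => 2 * PySem.List.pyGetD P (2 * eta * i + eta) 0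
          - PySem.List.pyGetD P (2 * eta * i) 0
          - PySem.List.pyGetD P (2 * eta * i + 2 * eta) 0)

-- ===== PRECONDITION & SPEC =====
-- Pre_ excludes exactly the inputs where the Python A raises ValueError:
-- eta ≤ 0, or fewer than 2*eta*n bits supplied.
def Pre_centred_binomial_from_bits (bits : List Int) (n : Int) (eta : Int) : Prop :=
  0 < eta ∧ 2 * eta * n ≤ (bits.length : Int)
instance (bits : List Int) (n : Int) (eta : Int) : Decidable (Pre_centred_binomial_from_bits bits n eta) := by unfold Pre_centred_binomial_from_bits; infer_instance

def pvWitness_centred_binomial_from_bits : List Int × Int × Int := ([1, 0, 1, 1], 1, 2)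

def Spec_centred_binomial_from_bits (bits : List Int) (n : Int) (eta : Int) (out : List Int) : Prop := out = centred_binomial_from_bits_alt bits n eta
instance (bits : List Int) (n : Int) (eta : Int) (out : List Int) : Decidable (Spec_centred_binomial_from_bits bits n eta out) := by unfold Spec_centred_binomial_from_bits; infer_instance

-- ===== CLAIM (what is proved, stated in full; the proofs are below) =====
def Claim_equal_centred_binomial_from_bits : Prop := ∀ (bits : List Int) (n : Int) (eta : Int), Dom_centred_binomial_from_bits bits n eta → Pre_centred_binomial_from_bits bits n eta → Spec_centred_binomial_from_bits bits n eta (centred_binomial_from_bits bits n eta)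

-- ===== LEMMAS AND PROOFS =====

-- prefix sum of the first k bits
def pvPref (bits : List Int) (k : Nat) : Int := (bits.take k).sum

theorem pvPref_succ (bits : List Int) (k : Nat) (hk : k < bits.length) :
    pvPref bits (k + 1) = pvPref bits k + bits[k] := by
  unfold pvPref
  rw [List.take_add_one, List.sum_append, List.getElem?_eq_getElem hk]
  simp

-- A's inner accumulation loop is an interval of the prefix sums
theorem pvInner (bits : List Int) (t base : Nat) (h : base + t ≤ bits.length) (init : Int) :
    (PySem.List.pyRange 0 (t : Int) 1).foldl
      (fun a j => a + PySem.List.pyGetD bits ((base : Int) + j) 0) init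
    = init + (pvPref bits (base + t) - pvPref bits base) := by
  induction t generalizing init with
  | zero => simp [PySem.List.pyRange_one_eq_nil]
  | succ t ih =>
    have hsr : PySem.List.pyRange 0 ((t : Int) + 1) 1
        = PySem.List.pyRange 0 (t : Int) 1 ++ [(t : Int)] := by
      exact PySem.List.pyRange_one_succ_right (by positivity)
    have ht : base + t < bits.length := by omega
    have hget : PySem.List.pyGetD bits ((base : Int) + (t : Int)) 0 = bits[base + t] := by
      have : ((base : Int) + (t : Int)) = ((base + t : Nat) : Int) := by push_cast; ring
      rw [this, PySem.List.pyGetD_natCast, List.getD_eq_getElem?_getD,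
        List.getElem?_eq_getElem ht]
      rfl
    push_cast
    rw [hsr, List.foldl_append, ih (by omega)]
    simp only [List.foldl_cons, List.foldl_nil, hget]
    rw [show base + (t + 1) = base + t + 1 from rfl, pvPref_succ bits (base + t) ht]
    ring

-- B's prefix-table loop builds exactly the list of prefix sums
theorem pvTable (bits : List Int) (m : Nat) (h : m ≤ bits.length) :
    (PySem.List.pyRange 0 (m : Int) 1).foldl
      (fun P k => P ++ [PySem.List.pyGetD P (-1) 0 + PySem.List.pyGetD bits k 0]) [0]
    = (List.range (m + 1)).map (pvPref bits) := by
  induction m with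
  | zero => simp [PySem.List.pyRange_one_eq_nil, pvPref]
  | succ m ih =>
    have hsr : PySem.List.pyRange 0 ((m : Int) + 1) 1
        = PySem.List.pyRange 0 (m : Int) 1 ++ [(m : Int)] := by
      exact PySem.List.pyRange_one_succ_right (by positivity)
    have hm : m < bits.length := by omega
    have hget : PySem.List.pyGetD bits ((m : Nat) : Int) 0 = bits[m] := by
      rw [PySem.List.pyGetD_natCast, List.getD_eq_getElem?_getD, List.getElem?_eq_getElem hm]
      rfl
    push_cast
    rw [hsr, List.foldl_append, ih (by omega)]
    simp only [List.foldl_cons, List.foldl_nil]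
    rw [List.range_succ (n := m + 1), List.map_append]
    congr 1
    have hsplit : (List.range (m + 1)).map (pvPref bits)
        = (List.range m).map (pvPref bits) ++ [pvPref bits m] := by
      rw [List.range_succ, List.map_append]; rfl
    rw [hsplit, PySem.List.pyGetD_neg_one_append_singleton, hget, ← pvPref_succ bits m hm]
    rfl

-- looking up the prefix-sum table
theorem pvLookup (bits : List Int) (m k : Nat) (hk : k ≤ m) :
    PySem.List.pyGetD ((List.range (m + 1)).map (pvPref bits)) ((k : Nat) : Int) 0
      = pvPref bits k := by
  rw [PySem.List.pyGetD_natCast, List.getD_eq_getElem?_getD]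
  rw [List.getElem?_map, List.getElem?_range (by omega)]
  rfl

-- the common closed form of one sample
def pvSample (bits : List Int) (t i : Nat) : Int :=
  2 * pvPref bits (2 * t * i + t) - pvPref bits (2 * t * i) - pvPref bits (2 * t * i + 2 * t)

-- A's outer loop produces the samples
theorem pvLoopA (bits : List Int) (t : Nat) (m : Nat) (h : 2 * t * m ≤ bits.length) :
    (PySem.List.pyRange 0 (m : Int) 1).foldl
      (fun (st : List Int × Int) _ =>
        let a := (PySem.List.pyRange 0 (t : Int) 1).foldl
          (fun a j => a + PySem.List.pyGetD bits (st.2 + j) 0) 0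
        let b := (PySem.List.pyRange 0 (t : Int) 1).foldl
          (fun b j => b + PySem.List.pyGetD bits (st.2 + (t : Int) + j) 0) 0
        (st.1 ++ [a - b], st.2 + 2 * (t : Int)))
      ([], 0)
    = ((List.range m).map (pvSample bits t), ((2 * t * m : Nat) : Int)) := by
  induction m with
  | zero => simp [PySem.List.pyRange_one_eq_nil]
  | succ m ih =>
    have hsr : PySem.List.pyRange 0 ((m : Int) + 1) 1
        = PySem.List.pyRange 0 (m : Int) 1 ++ [(m : Int)] := by
      exact PySem.List.pyRange_one_succ_right (by positivity)
    push_cast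
    rw [hsr, List.foldl_append, ih (by nlinarith)]
    simp only [List.foldl_cons, List.foldl_nil]
    have ha := pvInner bits t (2 * t * m) (by nlinarith) 0
    have hb' : ((2 * t * m : Nat) : Int) + (t : Int) = ((2 * t * m + t : Nat) : Int) := by
      push_cast; ring
    have hb := pvInner bits t (2 * t * m + t) (by nlinarith) 0
    rw [ha, hb', hb]
    rw [Prod.mk.injEq]
    constructor
    · rw [List.range_succ, List.map_append]
      congr 1
      simp only [List.map_cons, List.map_nil, pvSample]
      congr 1
      have : 2 * t * m + t + t = 2 * t * m + 2 * t := by ring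
      rw [this]
      ring
    · push_cast; ring

theorem pvRange_cast_map (n : Int) :
    PySem.List.pyRange 0 n 1 = (List.range n.toNat).map (fun k => ((k : Nat) : Int)) := by
  rw [PySem.List.pyRange_one]
  simp

-- ===== VERDICT (by name: the statement is the Claim_ definition above) =====
theorem centred_binomial_from_bits_spec : Claim_equal_centred_binomial_from_bits := by
  intro bits n eta _ hpre
  obtain ⟨heta, hlen⟩ := hpre
  unfold Spec_centred_binomial_from_bits centred_binomial_from_bits centred_binomial_from_bits_alt
  rw [if_neg (by omega), if_neg (by omega)]
  rw [if_neg (by omega), if_neg (by omega)]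
  by_cases hn : n ≤ 0
  · rw [PySem.List.pyRange_one_eq_nil hn]
    simp
  · replace hn : 0 < n := by omega
    set t := eta.toNat with ht
    set m := n.toNat with hm
    have heq : eta = (t : Int) := by omega
    have hneq : n = (m : Int) := by omega
    have hlen' : 2 * t * m ≤ bits.length := by
      have : ((2 * t * m : Nat) : Int) ≤ (bits.length : Int) := by
        push_cast
        calc ((2:Int) * t * m) = 2 * eta * n := by rw [heq, hneq]
          _ ≤ (bits.length : Int) := hlen
      exact_mod_cast this
    rw [heq, hneq]
    rw [pvLoopA bits t m hlen']
    have hneed : 2 * (t : Int) * (m : Int) = ((2 * t * m : Nat) : Int) := by push_cast; ring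
    rw [hneed, pvTable bits (2 * t * m) hlen']
    rw [pvRange_cast_map (m : Int), List.map_map]
    apply List.map_congr_left
    intro k hk
    have hkm : k < m := List.mem_range.mp hk
    simp only [Function.comp]
    have c1 : 2 * (t : Int) * (k : Int) + (t : Int) = ((2 * t * k + t : Nat) : Int) := by
      push_cast; ring
    have c2 : 2 * (t : Int) * (k : Int) = ((2 * t * k : Nat) : Int) := by push_cast; ring
    have c3 : 2 * (t : Int) * (k : Int) + 2 * (t : Int) = ((2 * t * k + 2 * t : Nat) : Int) := by
      push_cast; ring
    rw [c1, c3, c2,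
      pvLookup bits (2 * t * m) (2 * t * k + t) (by nlinarith),
      pvLookup bits (2 * t * m) (2 * t * k) (by nlinarith),
      pvLookup bits (2 * t * m) (2 * t * k + 2 * t) (by nlinarith)]
    rfl
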